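-- pv_equiv track=rewrite | github.com/thiagonoft/geradordescanner-uff | geradordescanner.py | pop_until_open_parenthesis
-- ===== SOURCE A (Python) =====
-- def pop_until_open_parenthesis(exp_stack):
--     nested = 0
--     expr = []
--
--     while exp_stack:
--         char = exp_stack.pop()
--         if char == '(':
--             nested -= 1
--             if nested == 0:
--                 break
--         elif char == ')':
--             nested += 1
--         expr.append(char)
--
--     return ''.join(reversed(expr))
-- ===== SOURCE B (Python) =====
-- def pop_until_open_parenthesis(exp_stack):
--     nested = 0
--     cut = -1
--     for i in range(len(exp_stack) - 1, -1, -1):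
--         s = exp_stack[i]
--         if s == '(':
--             nested -= 1
--             if nested == 0:
--                 cut = i
--                 break
--         elif s == ')':
--             nested += 1
--     if cut >= 0:
--         result = ''.join(exp_stack[cut + 1:])
--         del exp_stack[cut:]
--     else:
--         result = ''.join(exp_stack)
--         del exp_stack[:]
--     return result
-- ===== Notes on version B (the rewrite author's own statement) =====
-- stated objective: simpler
-- what changed: B replaces A's per-element pop-append-then-reverse loop with a descending index scan that only locates the cut index, then returns the joined contiguous suffix and deletes it in place.
import Mathlib
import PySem

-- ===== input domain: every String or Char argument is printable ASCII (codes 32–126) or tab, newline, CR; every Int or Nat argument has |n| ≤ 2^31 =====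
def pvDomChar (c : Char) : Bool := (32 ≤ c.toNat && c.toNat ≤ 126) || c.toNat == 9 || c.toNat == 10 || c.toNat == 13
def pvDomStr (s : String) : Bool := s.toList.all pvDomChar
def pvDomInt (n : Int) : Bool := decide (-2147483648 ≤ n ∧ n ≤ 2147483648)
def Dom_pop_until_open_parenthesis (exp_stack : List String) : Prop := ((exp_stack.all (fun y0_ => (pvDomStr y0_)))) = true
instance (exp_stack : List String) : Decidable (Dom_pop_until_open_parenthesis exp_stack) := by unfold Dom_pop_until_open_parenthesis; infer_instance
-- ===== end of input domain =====

-- B replaces A's pop-append-reverse loop by an index scan that locates the cut and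
-- joins the suffix directly (objective: simpler). Both Pythons mutate exp_stack
-- identically in place; the equivalence proved here is about the return value.


-- ===== PORT A =====
-- A pops from the end of exp_stack; we recurse structurally over exp_stack.reverse,
-- carrying A's state (nested, expr with append at the end) unchanged.
def popA_go : List String → Int → List String → List String
  | [], _, expr => expr
  | ch :: rest, nested, expr =>
    if ch = "(" then
      if nested - 1 = 0 then expr
      else popA_go rest (nested - 1) (expr ++ [ch])
    else if ch = ")" then popA_go rest (nested + 1) (expr ++ [ch])
    else popA_go rest nested (expr ++ [ch])

def pop_until_open_parenthesis (exp_stack : List String) : String :=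
  String.join (popA_go exp_stack.reverse 0 []).reverse

-- ===== PORT B =====
-- B scans by descending index with the same nested counter and records the cut
-- index; scanning i = len-1 … 0 is recursion over exp_stack.reverse, where the
-- current index equals the length of the remaining (reversed) tail.
def popB_findCut : List String → Int → Option Nat
  | [], _ => none
  | s :: rest, nested =>
    if s = "(" then
      if nested - 1 = 0 then some rest.length
      else popB_findCut rest (nested - 1)
    else if s = ")" then popB_findCut rest (nested + 1)
    else popB_findCut rest nested

def pop_until_open_parenthesis_alt (exp_stack : List String) : String :=
  match popB_findCut exp_stack.reverse 0 with
  | some cut => String.join (exp_stack.drop (cut + 1))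
  | none => String.join exp_stack

-- ===== PRECONDITION & SPEC =====
def Spec_pop_until_open_parenthesis (exp_stack : List String) (out : String) : Prop := out = pop_until_open_parenthesis_alt exp_stack
instance (exp_stack : List String) (out : String) : Decidable (Spec_pop_until_open_parenthesis exp_stack out) := by unfold Spec_pop_until_open_parenthesis; infer_instance

-- ===== CLAIM (what is proved, stated in full; the proofs are below) =====
def Claim_equal_pop_until_open_parenthesis : Prop := ∀ (exp_stack : List String), Dom_pop_until_open_parenthesis exp_stack → Spec_pop_until_open_parenthesis exp_stack (pop_until_open_parenthesis exp_stack)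

-- ===== LEMMAS AND PROOFS =====

theorem popA_go_acc (r : List String) : ∀ (n : Int) (acc : List String),
    popA_go r n acc = acc ++ popA_go r n [] := by
  induction r with
  | nil => intro n acc; simp [popA_go]
  | cons ch rest ih =>
    intro n acc
    simp only [popA_go]
    split_ifs with h1 h2 h3
    · simp
    · rw [ih, ih (n - 1) ([] ++ [ch])]; simp
    · rw [ih, ih (n + 1) ([] ++ [ch])]; simp
    · rw [ih, ih n ([] ++ [ch])]; simp

-- Characterisation: either no cut is found and A appended every element,
-- or the reversed stack splits as pre ++ "(" :: rest with cut = rest.length.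
theorem popA_popB (r : List String) : ∀ (n : Int),
    (popB_findCut r n = none ∧ popA_go r n [] = r) ∨
    (∃ pre rest, popB_findCut r n = some rest.length ∧ popA_go r n [] = pre ∧
      r = pre ++ "(" :: rest) := by
  induction r with
  | nil => intro n; left; simp [popB_findCut, popA_go]
  | cons ch rest ih =>
    intro n
    simp only [popB_findCut, popA_go]
    split_ifs with h1 h2 h3
    · right; exact ⟨[], rest, rfl, rfl, by simp [h1]⟩
    · rcases ih (n - 1) with ⟨hb, ha⟩ | ⟨pre, tail, hb, ha, hr⟩
      · left; exact ⟨hb, by rw [popA_go_acc, ha]; simp⟩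
      · right; exact ⟨ch :: pre, tail, hb, by rw [popA_go_acc, ha]; simp, by simp [hr]⟩
    · rcases ih (n + 1) with ⟨hb, ha⟩ | ⟨pre, tail, hb, ha, hr⟩
      · left; exact ⟨hb, by rw [popA_go_acc, ha]; simp⟩
      · right; exact ⟨ch :: pre, tail, hb, by rw [popA_go_acc, ha]; simp, by simp [hr]⟩
    · rcases ih n with ⟨hb, ha⟩ | ⟨pre, tail, hb, ha, hr⟩
      · left; exact ⟨hb, by rw [popA_go_acc, ha]; simp⟩
      · right; exact ⟨ch :: pre, tail, hb, by rw [popA_go_acc, ha]; simp, by simp [hr]⟩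

-- ===== VERDICT (by name: the statement is the Claim_ definition above) =====
theorem pop_until_open_parenthesis_spec : Claim_equal_pop_until_open_parenthesis := by
  intro xs _
  unfold Spec_pop_until_open_parenthesis pop_until_open_parenthesis pop_until_open_parenthesis_alt
  rcases popA_popB xs.reverse 0 with ⟨hb, ha⟩ | ⟨pre, tail, hb, ha, hr⟩
  · rw [hb, ha, List.reverse_reverse]
  · rw [hb, ha]
    show String.join pre.reverse = String.join (List.drop (tail.length + 1) xs)
    have hx : xs = (tail.reverse ++ ["("]) ++ pre.reverse := by
      have := congrArg List.reverse hr
      simpa using this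
    have hlen : tail.length + 1 = (tail.reverse ++ ["("]).length := by simp
    rw [hx, hlen, List.drop_left]
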